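-- pv_equiv track=rewrite | github.com/BruRangel/BIXECAMP | PROBLEMS/binary_search/new_year_and_hurry_fixed.py | n_binary_search
-- ===== SOURCE A (Python) =====
-- def n_binary_search(low, high, k):
--     best = 0  # Stores the maximum number of problems solved
--
--     while low <= high:
--         mid = low + (high - low) // 2  # Avoid overflow
--         time_spent = sum(5 * i for i in range(1, mid + 1))  # Calculate total time for 'mid' problems
--
--         if time_spent + k <= 240:  # Check if the total time is valid
--             best = mid  # Update the best result
--             low = mid + 1  # Try solving more problems
--         else:
--             high = mid - 1  # Reduce the number of problems
--
--     return best  # Return the maximum number of problems possible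
-- ===== SOURCE B (Python) =====
-- def _isqrt(x):
--     # Integer square root by digit-pair recursion (no imports needed).
--     if x < 2:
--         return x
--     r = 2 * _isqrt(x // 4)
--     return r + 1 if (r + 1) * (r + 1) <= x else r
--
--
-- def n_binary_search(low, high, k):
--     # Closed form: largest n with 5*n*(n+1)//2 + k <= 240, clamped to [low, high].
--     if low > high or k > 240:
--         return 0
--     m = (2 * (240 - k)) // 5
--     cap = (_isqrt(4 * m + 1) - 1) // 2
--     ans = min(high, cap)
--     return ans if ans >= low else 0
-- ===== Notes on version B (the rewrite author's own statement) =====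
-- stated objective: alternative
-- what changed: Replaces A's binary search (which recomputes the time as a linear generator-sum on every step) by a closed-form solution: the largest n with 5*n*(n+1)/2 + k <= 240 is obtained directly from a hand-written integer square root and then clamped to [low, high].
import Mathlib
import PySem

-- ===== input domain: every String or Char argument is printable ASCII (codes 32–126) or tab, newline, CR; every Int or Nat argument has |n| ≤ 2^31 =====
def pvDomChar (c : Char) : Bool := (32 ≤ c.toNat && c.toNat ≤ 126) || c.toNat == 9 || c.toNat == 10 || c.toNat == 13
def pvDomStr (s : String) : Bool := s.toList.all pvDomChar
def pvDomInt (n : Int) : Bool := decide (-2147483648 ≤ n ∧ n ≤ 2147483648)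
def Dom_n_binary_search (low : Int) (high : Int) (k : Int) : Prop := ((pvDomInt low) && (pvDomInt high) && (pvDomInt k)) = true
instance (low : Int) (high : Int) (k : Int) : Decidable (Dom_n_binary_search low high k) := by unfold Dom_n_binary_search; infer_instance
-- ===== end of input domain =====

-- B replaces A's binary search (whose per-step cost is a linear sum) by a closed-form
-- solution of the triangular inequality via a hand-written integer square root.

-- ===== PORT A =====
-- time_spent = sum(5 * i for i in range(1, mid + 1))
def nbsSum (mid : Int) : Int :=
  (PySem.List.pyRange 1 (mid + 1) 1).foldl (fun s i => s + 5 * i) 0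

-- the while-loop of A, state (low, high, best); k is read-only
def nbsLoop (low high k best : Int) : Int :=
  if h : low ≤ high then
    let mid := low + PySem.Int.floordiv (high - low) 2
    if nbsSum mid + k ≤ 240 then nbsLoop (mid + 1) high k mid
    else nbsLoop low (mid - 1) k best
  else best
termination_by (high - low + 1).toNat
decreasing_by
  · simp only [PySem.Int.floordiv_eq_ediv_of_pos (show (0:Int) < 2 by norm_num)]; omega
  · simp only [PySem.Int.floordiv_eq_ediv_of_pos (show (0:Int) < 2 by norm_num)]; omega

def n_binary_search (low : Int) (high : Int) (k : Int) : Int :=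
  nbsLoop low high k 0

-- ===== PORT B =====
-- _isqrt from Source B: digit-pair recursion
def nbsIsqrt (x : Int) : Int :=
  if h : x < 2 then x
  else
    let r := 2 * nbsIsqrt (PySem.Int.floordiv x 4)
    if (r + 1) * (r + 1) ≤ x then r + 1 else r
termination_by x.toNat
decreasing_by
  simp only [PySem.Int.floordiv_eq_ediv_of_pos (show (0:Int) < 4 by norm_num)]; omega

def n_binary_search_alt (low : Int) (high : Int) (k : Int) : Int :=
  if high < low ∨ 240 < k then 0
  else
    let m := PySem.Int.floordiv (2 * (240 - k)) 5
    let cap := PySem.Int.floordiv (nbsIsqrt (4 * m + 1) - 1) 2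
    let ans := min high cap
    if low ≤ ans then ans else 0

-- ===== PRECONDITION & SPEC =====
def Spec_n_binary_search (low : Int) (high : Int) (k : Int) (out : Int) : Prop := out = n_binary_search_alt low high k
instance (low : Int) (high : Int) (k : Int) (out : Int) : Decidable (Spec_n_binary_search low high k out) := by unfold Spec_n_binary_search; infer_instance

-- ===== CLAIM (what is proved, stated in full; the proofs are below) =====
def Claim_equal_n_binary_search : Prop := ∀ (low : Int) (high : Int) (k : Int), Dom_n_binary_search low high k → Spec_n_binary_search low high k (n_binary_search low high k)

-- ===== LEMMAS AND PROOFS =====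

lemma nbsSum_nonpos (mid : Int) (h : mid ≤ 0) : nbsSum mid = 0 := by
  unfold nbsSum
  rw [PySem.List.pyRange_one_eq_nil (by omega)]
  rfl

lemma nbsSum_rec (mid : Int) (h : 1 ≤ mid) : nbsSum mid = nbsSum (mid - 1) + 5 * mid := by
  unfold nbsSum
  have h1 : mid - 1 + 1 = mid := by ring
  rw [h1, PySem.List.pyRange_one_succ_right (show (1:Int) ≤ mid by omega), List.foldl_append]
  rfl

lemma nbsSum_closed (mid : Int) (h : 0 ≤ mid) : 2 * nbsSum mid = 5 * mid * (mid + 1) := by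
  induction hn : mid.toNat generalizing mid with
  | zero =>
    have hm : mid = 0 := by omega
    subst hm
    rw [nbsSum_nonpos 0 (by omega)]
    norm_num
  | succ n ih =>
    have h1 : 1 ≤ mid := by omega
    rw [nbsSum_rec mid h1]
    have := ih (mid - 1) (by omega) (by omega)
    nlinarith [this]

lemma nbsSum_nonneg (mid : Int) : 0 ≤ nbsSum mid := by
  by_cases h : mid ≤ 0
  · simp [nbsSum_nonpos mid h]
  · have := nbsSum_closed mid (by omega)
    nlinarith [this]

lemma nbsIsqrt_specAux : ∀ n : Nat, ∀ x : Int, x.toNat ≤ n → 0 ≤ x →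
    0 ≤ nbsIsqrt x ∧ nbsIsqrt x * nbsIsqrt x ≤ x ∧ x < (nbsIsqrt x + 1) * (nbsIsqrt x + 1) := by
  intro n
  induction n with
  | zero =>
    intro x hn hx
    have hx0 : x = 0 := by omega
    subst hx0
    rw [nbsIsqrt, dif_pos (by norm_num)]
    norm_num
  | succ n ih =>
    intro x hn hx
    by_cases h : x < 2
    · rw [nbsIsqrt, dif_pos h]
      have : x = 0 ∨ x = 1 := by omega
      rcases this with h0 | h0 <;> subst h0 <;> norm_num
    · have hq : PySem.Int.floordiv x 4 = x / 4 :=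
        PySem.Int.floordiv_eq_ediv_of_pos (by norm_num)
      have hq0 : 0 ≤ PySem.Int.floordiv x 4 := by rw [hq]; omega
      have hqn : (PySem.Int.floordiv x 4).toNat ≤ n := by rw [hq]; omega
      obtain ⟨hs0, hs1, hs2⟩ := ih (PySem.Int.floordiv x 4) hqn hq0
      have hb : 4 * (PySem.Int.floordiv x 4) ≤ x ∧ x < 4 * (PySem.Int.floordiv x 4) + 4 := by
        rw [hq]; omega
      rw [nbsIsqrt, dif_neg h]
      set s := nbsIsqrt (PySem.Int.floordiv x 4) with hsdef
      simp only
      split_ifs with hc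
      · refine ⟨by omega, hc, by nlinarith⟩
      · refine ⟨by omega, by nlinarith, by nlinarith⟩

lemma nbsIsqrt_spec (x : Int) (hx : 0 ≤ x) :
    0 ≤ nbsIsqrt x ∧ nbsIsqrt x * nbsIsqrt x ≤ x ∧ x < (nbsIsqrt x + 1) * (nbsIsqrt x + 1) :=
  nbsIsqrt_specAux x.toNat x le_rfl hx

-- A's loop when no mid can satisfy the time bound (k > 240): best never changes
lemma nbsLoop_none (k : Int) (hk : 240 < k) :
    ∀ n : Nat, ∀ low high best : Int, (high - low + 1).toNat ≤ n →
      nbsLoop low high k best = best := by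
  intro n
  induction n with
  | zero =>
    intro low high best hn
    rw [nbsLoop, dif_neg (by omega)]
  | succ n ih =>
    intro low high best hn
    by_cases h : low ≤ high
    · rw [nbsLoop, dif_pos h]
      have hfd : PySem.Int.floordiv (high - low) 2 = (high - low) / 2 :=
        PySem.Int.floordiv_eq_ediv_of_pos (by norm_num)
      simp only
      rw [if_neg (by have := nbsSum_nonneg (low + PySem.Int.floordiv (high - low) 2); omega)]
      exact ih _ _ _ (by rw [hfd]; omega)
    · rw [nbsLoop, dif_neg h]

-- A's loop with a monotone predicate characterised by cap
lemma nbsLoop_eq (k cap : Int) (hP : ∀ mid : Int, nbsSum mid + k ≤ 240 ↔ mid ≤ cap) :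
    ∀ n : Nat, ∀ low high best : Int, (high - low + 1).toNat ≤ n →
      nbsLoop low high k best = if low ≤ high ∧ low ≤ cap then min high cap else best := by
  intro n
  induction n with
  | zero =>
    intro low high best hn
    rw [nbsLoop, dif_neg (by omega), if_neg (by omega)]
  | succ n ih =>
    intro low high best hn
    by_cases h : low ≤ high
    · rw [nbsLoop, dif_pos h]
      have hfd : PySem.Int.floordiv (high - low) 2 = (high - low) / 2 :=
        PySem.Int.floordiv_eq_ediv_of_pos (by norm_num)
      set mid := low + PySem.Int.floordiv (high - low) 2 with hmid
      have hmb : low ≤ mid ∧ mid ≤ high := by rw [hmid, hfd]; omega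
      simp only
      by_cases hc : nbsSum mid + k ≤ 240
      · have hmc : mid ≤ cap := (hP mid).mp hc
        rw [if_pos hc, ih (mid + 1) high mid (by omega)]
        simp only [min_def]
        split_ifs <;> omega
      · have hmc : ¬ mid ≤ cap := fun hh => hc ((hP mid).mpr hh)
        rw [if_neg hc, ih low (mid - 1) best (by omega)]
        simp only [min_def]
        split_ifs <;> omega
    · rw [nbsLoop, dif_neg h, if_neg (by omega)]

-- ===== VERDICT (by name: the statement is the Claim_ definition above) =====
theorem n_binary_search_spec : Claim_equal_n_binary_search := by
  unfold Claim_equal_n_binary_search Spec_n_binary_search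
  intro low high k _hd
  unfold n_binary_search
  by_cases hk : 240 < k
  · rw [nbsLoop_none k hk _ low high 0 le_rfl]
    unfold n_binary_search_alt
    rw [if_pos (Or.inr hk)]
  · push Not at hk
    set m := PySem.Int.floordiv (2 * (240 - k)) 5 with hmdef
    have hmb : 5 * m ≤ 2 * (240 - k) ∧ 2 * (240 - k) < 5 * m + 5 ∧ 0 ≤ m := by
      rw [hmdef, PySem.Int.floordiv_eq_ediv_of_pos (show (0:Int) < 5 by norm_num)]; omega
    obtain ⟨hs0, hs1, hs2⟩ := nbsIsqrt_spec (4 * m + 1) (by omega)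
    set s := nbsIsqrt (4 * m + 1) with hsdef
    have hsge : 1 ≤ s := by nlinarith
    set cap := PySem.Int.floordiv (s - 1) 2 with hcapdef
    have hcapb : 2 * cap ≤ s - 1 ∧ s - 1 < 2 * cap + 2 := by
      rw [hcapdef, PySem.Int.floordiv_eq_ediv_of_pos (show (0:Int) < 2 by norm_num)]; omega
    have hP : ∀ mid : Int, nbsSum mid + k ≤ 240 ↔ mid ≤ cap := by
      intro mid
      by_cases hmid : mid ≤ 0
      · rw [nbsSum_nonpos mid hmid]
        constructor
        · intro _; omega
        · intro _; omega
      · push Not at hmid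
        have hcl := nbsSum_closed mid (by omega)
        have hsq : (2 * mid + 1) * (2 * mid + 1) = 4 * (mid * (mid + 1)) + 1 := by ring
        constructor
        · intro hc
          have h1 : 5 * (mid * (mid + 1)) ≤ 2 * (240 - k) := by nlinarith
          have h2 : mid * (mid + 1) ≤ m := by omega
          have h3 : (2 * mid + 1) * (2 * mid + 1) ≤ 4 * m + 1 := by omega
          have h4 : 2 * mid + 1 ≤ s := by nlinarith
          omega
        · intro hc
          have h4 : 2 * mid + 1 ≤ s := by omega
          have h3 : (2 * mid + 1) * (2 * mid + 1) ≤ 4 * m + 1 := by nlinarith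
          have h2 : mid * (mid + 1) ≤ m := by omega
          have h1 : 5 * (mid * (mid + 1)) ≤ 2 * (240 - k) := by omega
          nlinarith
    rw [nbsLoop_eq k cap hP _ low high 0 le_rfl]
    simp only [n_binary_search_alt]
    rw [← hmdef, ← hsdef, ← hcapdef]
    by_cases hlh : high < low
    · rw [if_pos (Or.inl hlh), if_neg (by omega)]
    · rw [if_neg (show ¬ (high < low ∨ 240 < k) by omega)]
      simp only [min_def]
      split_ifs <;> omega
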